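-- pv_equiv track=rewrite | github.com/SandeepSinghGahir/Interview-Questions | GoogleWateringPlant-2.py | getNumberOfRefills
-- ===== SOURCE A (Python) =====
-- def getNumberOfRefills(plantsArray,capacity):
--     cap1 = capacity[0]
--     cap2 = capacity[1]
--     refills = 0
--     currentCapacity1,currentCapacity2 = 0,0
--     front = 0
--     rear = len(plantsArray)-1
--     while front < rear:
--         if plantsArray[front] > currentCapacity1:
--             refills+=1
--             currentCapacity1 = cap1 - plantsArray[front]
--         else :
--             currentCapacity1 = currentCapacity1 - plantsArray[front]
--         if plantsArray[rear] > currentCapacity2: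
--             refills+=1
--             currentCapacity2 = cap2 - plantsArray[rear]
--         else:
--             currentCapacity2 = currentCapacity2 - plantsArray[rear]
--         front+=1
--         rear-=1
--
--     if front==rear and currentCapacity1 + currentCapacity2 < plantsArray[front]:
--         refills+=1
--         return refills
--     return refills
-- ===== SOURCE B (Python) =====
-- def _simulate(plants, cap):
--     """Water plants in order with one can of size cap; return (refills, water left)."""
--     refills = 0
--     cur = 0
--     for p in plants:
--         if p > cur:
--             refills += 1
--             cur = cap - p
--         else:
--             cur = cur - p
--     return refills, cur
--
-- def getNumberOfRefills(plantsArray, capacity):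
--     n = len(plantsArray)
--     h = n // 2
--     r1, c1 = _simulate(plantsArray[:h], capacity[0])
--     r2, c2 = _simulate(plantsArray[n - h:][::-1], capacity[1])
--     refills = r1 + r2
--     if n % 2 == 1 and c1 + c2 < plantsArray[h]:
--         refills += 1
--     return refills
-- ===== Notes on version B (the rewrite author's own statement) =====
-- stated objective: simpler
-- what changed: A's single interleaved two-pointer while-loop with shared state is replaced by one reusable one-gardener simulation helper folded over the front half and over the reversed rear half, plus a parity check for the middle plant.
import Mathlib
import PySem

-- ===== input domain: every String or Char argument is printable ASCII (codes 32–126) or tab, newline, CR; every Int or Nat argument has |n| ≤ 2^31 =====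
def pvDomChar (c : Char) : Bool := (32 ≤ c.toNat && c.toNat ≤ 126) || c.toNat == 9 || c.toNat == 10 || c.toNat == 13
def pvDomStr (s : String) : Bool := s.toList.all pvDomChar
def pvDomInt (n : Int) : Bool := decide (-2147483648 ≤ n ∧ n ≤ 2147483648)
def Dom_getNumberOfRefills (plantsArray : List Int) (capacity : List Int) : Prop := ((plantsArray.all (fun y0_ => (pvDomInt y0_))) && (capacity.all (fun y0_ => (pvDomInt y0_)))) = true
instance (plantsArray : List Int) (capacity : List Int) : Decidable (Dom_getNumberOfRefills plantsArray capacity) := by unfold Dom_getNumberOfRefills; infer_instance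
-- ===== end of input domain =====

-- B replaces A's interleaved two-pointer while-loop by two independent one-gardener
-- simulation passes (a shared helper folded over each half) plus a middle check (objective: simpler).


-- ===== PORT A =====
-- A's while-loop: two pointers front/rear moving towards each other with interleaved state
-- (refills, currentCapacity1, currentCapacity2); returns (front, rear, refills, c1, c2) at exit.
-- plantsArray[front]/plantsArray[rear] are always in range while the loop runs, so `.getD 0`
-- (totalisation only) is never exercised.
def loopA (plants : List Int) (cap1 cap2 : Int) (front rear refills c1 c2 : Int) :
    Int × Int × Int × Int × Int :=
  if front < rear then
    let pf := (PySem.List.pyGet? plants front).getD 0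
    let s1 : Int × Int := if pf > c1 then (refills + 1, cap1 - pf) else (refills, c1 - pf)
    let pr := (PySem.List.pyGet? plants rear).getD 0
    let s2 : Int × Int := if pr > c2 then (s1.1 + 1, cap2 - pr) else (s1.1, c2 - pr)
    loopA plants cap1 cap2 (front + 1) (rear - 1) s2.1 s1.2 s2.2
  else (front, rear, refills, c1, c2)
termination_by (rear - front).toNat
decreasing_by omega

def getNumberOfRefills (plantsArray : List Int) (capacity : List Int) : Int :=
  -- capacity[0]/capacity[1]: in range under Pre_ (capacity has ≥ 2 elements)
  let cap1 := (PySem.List.pyGet? capacity 0).getD 0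
  let cap2 := (PySem.List.pyGet? capacity 1).getD 0
  let st := loopA plantsArray cap1 cap2 0 (PySem.List.len plantsArray - 1) 0 0 0
  -- st = (front, rear, refills, currentCapacity1, currentCapacity2) at loop exit
  if st.1 = st.2.1 ∧ st.2.2.2.1 + st.2.2.2.2 < (PySem.List.pyGet? plantsArray st.1).getD 0
  then st.2.2.1 + 1 else st.2.2.1

-- ===== PORT B =====
-- one gardener watering `plants` left to right with a can of size `cap`; returns (refills, water left)
def simStep (cap : Int) (s : Int × Int) (p : Int) : Int × Int :=
  if p > s.2 then (s.1 + 1, cap - p) else (s.1, s.2 - p)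

def simulate (plants : List Int) (cap : Int) : Int × Int :=
  plants.foldl (simStep cap) (0, 0)

def getNumberOfRefills_alt (plantsArray : List Int) (capacity : List Int) : Int :=
  let n := plantsArray.length
  let h := n / 2
  let s1 := simulate (PySem.List.slice plantsArray none (some (h : Int)))
              ((PySem.List.pyGet? capacity 0).getD 0)
  let s2 := simulate (PySem.List.slice plantsArray (some ((n - h : Nat) : Int)) none).reverse
              ((PySem.List.pyGet? capacity 1).getD 0)
  let refills := s1.1 + s2.1
  if n % 2 = 1 ∧ s1.2 + s2.2 < (PySem.List.pyGet? plantsArray (h : Int)).getD 0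
  then refills + 1 else refills

-- ===== PRECONDITION & SPEC =====
-- Pre_ excludes exactly the inputs on which A raises IndexError: capacity shorter than 2
-- (capacity[1] is read unconditionally).
def Pre_getNumberOfRefills (_plantsArray : List Int) (capacity : List Int) : Prop :=
  2 ≤ capacity.length
instance (plantsArray : List Int) (capacity : List Int) : Decidable (Pre_getNumberOfRefills plantsArray capacity) := by unfold Pre_getNumberOfRefills; infer_instance

def pvWitness_getNumberOfRefills : List Int × List Int := ([2, 4, 5, 1, 2], [5, 7])

def Spec_getNumberOfRefills (plantsArray : List Int) (capacity : List Int) (out : Int) : Prop := out = getNumberOfRefills_alt plantsArray capacity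
instance (plantsArray : List Int) (capacity : List Int) (out : Int) : Decidable (Spec_getNumberOfRefills plantsArray capacity out) := by unfold Spec_getNumberOfRefills; infer_instance

-- ===== CLAIM (what is proved, stated in full; the proofs are below) =====
def Claim_equal_getNumberOfRefills : Prop := ∀ (plantsArray : List Int) (capacity : List Int), Dom_getNumberOfRefills plantsArray capacity → Pre_getNumberOfRefills plantsArray capacity → Spec_getNumberOfRefills plantsArray capacity (getNumberOfRefills plantsArray capacity)

-- ===== LEMMAS AND PROOFS =====

-- `simulate` fold restarted from an arbitrary state
def simFrom (cap : Int) (s : Int × Int) (xs : List Int) : Int × Int :=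
  xs.foldl (simStep cap) s

lemma simFrom_shift (cap : Int) (xs : List Int) : ∀ (r c : Int),
    simFrom cap (r, c) xs = (r + (simFrom cap (0, c) xs).1, (simFrom cap (0, c) xs).2) := by
  induction xs with
  | nil => intro r c; simp [simFrom]
  | cons p xs ih =>
    intro r c
    simp only [simFrom, List.foldl_cons, simStep] at *
    split_ifs with hp
    · rw [ih (r + 1) (cap - p), ih (0 + 1) (cap - p)]
      simp
      ring
    · exact ih r (c - p)

lemma simFrom_cons (cap c p : Int) (xs : List Int) :
    simFrom cap (0, c) (p :: xs) =
      ((simStep cap (0, c) p).1 + (simFrom cap (0, (simStep cap (0, c) p).2) xs).1,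
       (simFrom cap (0, (simStep cap (0, c) p).2) xs).2) := by
  have h := simFrom_shift cap xs (simStep cap (0, c) p).1 (simStep cap (0, c) p).2
  simp only [simFrom, List.foldl_cons] at *
  rw [← h]

-- bridge from A's per-plant update to B's `simStep`
lemma stepA (cap r c p : Int) :
    (if p > c then (r + 1, cap - p) else (r, c - p)) =
      ((r + (simStep cap (0, c) p).1 : Int), (simStep cap (0, c) p).2) := by
  simp only [simStep]
  split_ifs <;> simp

-- the main invariant: from state (front = i, rear = n-1-i), the loop finishes the front
-- segment plants[i:h] and the rear segment (plants[n-h:n-i])[::-1] independently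
lemma loopA_eq (plants : List Int) (cap1 cap2 : Int) :
    ∀ (k i : ℕ) (r c1 c2 : Int), i + k = plants.length / 2 →
    loopA plants cap1 cap2 (i : Int) ((plants.length : Int) - 1 - i) r c1 c2 =
      (((plants.length / 2 : Nat) : Int),
       ((plants.length : Int) - 1 - ((plants.length / 2 : Nat) : Int)),
       r + (simFrom cap1 (0, c1) ((plants.drop i).take k)).1
         + (simFrom cap2 (0, c2) (((plants.drop (plants.length - plants.length / 2)).take k).reverse)).1,
       (simFrom cap1 (0, c1) ((plants.drop i).take k)).2,
       (simFrom cap2 (0, c2) (((plants.drop (plants.length - plants.length / 2)).take k).reverse)).2) := by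
  intro k
  induction k with
  | zero =>
    intro i r c1 c2 hik
    rw [loopA]
    rw [if_neg (by omega)]
    simp [simFrom]
    omega
  | succ k ih =>
    intro i r c1 c2 hik
    have hn : plants.length ≥ 2 := by omega
    have hi : i < plants.length := by omega
    have hrearN : plants.length - 1 - i < plants.length := by omega
    have hcast : ((plants.length : Int) - 1 - i) = ((plants.length - 1 - i : Nat) : Int) := by
      omega
    rw [loopA, if_pos (by omega)]
    simp only [hcast, PySem.List.pyGet?_natCast]
    rw [List.getElem?_eq_getElem hi, List.getElem?_eq_getElem hrearN]
    simp only [Option.getD_some, stepA]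
    have hrec : ((i : Int) + 1) = ((i + 1 : Nat) : Int) := by omega
    have hrec2 : (((plants.length - 1 - i : Nat) : Int) - 1) = ((plants.length : Int) - 1 - ((i + 1 : Nat) : Int)) := by
      push_cast; omega
    rw [hrec, hrec2, ih (i + 1) _ _ _ (by omega)]
    -- decompose the two segments
    have hfront : (plants.drop i).take (k + 1) = plants[i] :: (plants.drop (i + 1)).take k := by
      rw [List.drop_eq_getElem_cons hi, List.take_succ_cons]
    have hrlen : plants.length - plants.length / 2 + k = plants.length - 1 - i := by omega
    have hklt : k < (plants.drop (plants.length - plants.length / 2)).length := by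
      rw [List.length_drop]; omega
    have hrear : (plants.drop (plants.length - plants.length / 2)).take (k + 1) =
        (plants.drop (plants.length - plants.length / 2)).take k ++ [plants[plants.length - 1 - i]] := by
      rw [List.take_add_one, List.getElem?_eq_getElem hklt]
      simp [List.getElem_drop, hrlen]
    rw [hfront, hrear, List.reverse_append]
    simp only [List.reverse_singleton, List.singleton_append, simFrom_cons]
    simp only [Prod.mk.injEq]
    and_intros <;> ((try simp); (try ring))

-- ===== VERDICT (by name: the statement is the Claim_ definition above) =====
theorem getNumberOfRefills_spec : Claim_equal_getNumberOfRefills := by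
  intro plants capacity _hDom _hPre
  unfold Spec_getNumberOfRefills getNumberOfRefills getNumberOfRefills_alt
  simp only [PySem.List.len_eq]
  have hL := loopA_eq plants ((PySem.List.pyGet? capacity 0).getD 0)
      ((PySem.List.pyGet? capacity 1).getD 0) (plants.length / 2) 0 0 0 0 (by omega)
  simp only [Nat.cast_zero, sub_zero, zero_add, List.drop_zero] at hL
  rw [hL]
  have hfront : PySem.List.slice plants none (some ((plants.length / 2 : Nat) : Int)) =
      plants.take (plants.length / 2) := PySem.List.slice_to_natCast ..
  have hrear : (plants.drop (plants.length - plants.length / 2)).take (plants.length / 2) =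
      PySem.List.slice plants (some ((plants.length - plants.length / 2 : Nat) : Int)) none := by
    rw [PySem.List.slice_from_natCast]
    exact List.take_of_length_le (by rw [List.length_drop]; omega)
  simp only [simulate, simFrom, hfront, hrear] at *
  have hpar : (((plants.length / 2 : Nat) : Int) = (plants.length : Int) - 1 - ((plants.length / 2 : Nat) : Int))
      ↔ plants.length % 2 = 1 := by omega
  split_ifs with hA hB hB
  · rfl
  · exact absurd ⟨hpar.mp hA.1, hA.2⟩ hB
  · exact absurd ⟨hpar.mpr hB.1, hB.2⟩ hA
  · rfl
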